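-- pv_equiv track=rewrite | github.com/fediasonin/FINAL_BOSS | scripts/delete_group.py | get_removal_order
-- ===== SOURCE A (Python) =====
-- def get_removal_order(dependency_tree):
--     """
--     Получить порядок удаления групп (сначала листья, затем родительские группы).
--     """
--     removal_order = []
--
--     def visit(group_name):
--         # Если группа уже обработана, пропускаем
--         if group_name in removal_order:
--             return
--         # Рекурсивно обходим все зависимости
--         for dependency in dependency_tree.get(group_name, []):
--             visit(dependency)
--         # Добавляем группу в порядок удаления
--         removal_order.append(group_name)
--
--     # Обходим все группы в дереве
--     for group in dependency_tree:
--         visit(group)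
--
--     return removal_order
-- ===== SOURCE B (Python) =====
-- def get_removal_order(dependency_tree):
--     """
--     Получить порядок удаления групп (сначала листья, затем родительские группы).
--     Iterative post-order DFS with an explicit stack of (node, exit?) frames.
--     """
--     removal_order = []
--     for group in dependency_tree:
--         if group in removal_order:
--             continue
--         stack = [(group, False)]
--         while stack:
--             node, done = stack.pop()
--             if done:
--                 # exit frame: all dependencies of node are emitted, node is not yet
--                 # (acyclic input: the recursive original never returns on a cycle)
--                 removal_order.append(node)
--             elif node not in removal_order:
--                 stack.append((node, True))
--                 deps = dependency_tree.get(node, [])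
--                 stack.extend((dep, False) for dep in reversed(deps))
--     return removal_order
-- ===== Notes on version B (the rewrite author's own statement) =====
-- stated objective: alternative
-- what changed: The recursive post-order DFS with a nested closure is replaced by an iterative DFS driving an explicit stack of (node, enter/exit) frames, emitting a node when its exit frame is popped; same output order, no recursion. Pre_ admits exactly the acyclic inputs: on a cyclic graph A raises RecursionError (returns nothing), and B loops.
import Mathlib
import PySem

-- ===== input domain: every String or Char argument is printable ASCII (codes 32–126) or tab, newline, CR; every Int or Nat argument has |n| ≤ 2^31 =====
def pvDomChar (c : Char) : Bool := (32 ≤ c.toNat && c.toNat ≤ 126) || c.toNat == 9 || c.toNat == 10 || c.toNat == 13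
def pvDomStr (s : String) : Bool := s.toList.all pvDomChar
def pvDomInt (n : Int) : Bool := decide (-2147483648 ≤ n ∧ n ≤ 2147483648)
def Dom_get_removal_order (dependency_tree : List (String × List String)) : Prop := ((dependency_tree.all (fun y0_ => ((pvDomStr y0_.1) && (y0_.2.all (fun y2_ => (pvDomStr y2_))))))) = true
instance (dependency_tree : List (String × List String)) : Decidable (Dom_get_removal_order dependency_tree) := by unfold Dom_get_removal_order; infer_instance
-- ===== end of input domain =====

-- B replaces A's recursive post-order DFS by an iterative DFS over an explicit stack of
-- (node, enter/exit) frames (objective: alternative decomposition, same output).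
-- Both loops are totalized with fuel; under Pre_ (acyclic graph) the fuel is proved sufficient.

-- shared dict primitive: dependency_tree.get(n, [])
def pvDeps (dt : List (String × List String)) (n : String) : List String :=
  PySem.Dict.getD (PySem.Dict.mk dt) n []

-- ===== PORT A =====
-- the nested closure `visit`; fuel bounds the recursion depth (≤ number of keys + 1 on acyclic input)
def pvVisitA (dt : List (String × List String)) : Nat → String → List String → List String
  | 0, _, acc => acc      -- fuel exhaustion: unreachable under Pre_
  | f + 1, g, acc =>
      if acc.contains g then acc
      else ((pvDeps dt g).foldl (fun a d => pvVisitA dt f d a) acc) ++ [g]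

def get_removal_order (dependency_tree : List (String × List String)) : List String :=
  (PySem.Dict.keys (PySem.Dict.mk dependency_tree)).foldl
    (fun acc g => pvVisitA dependency_tree (dependency_tree.length + 1) g acc) []

-- ===== PORT B =====
-- fuel bound for the stack loop: an over-approximation of the number of pops needed for one seed frame
def pvFuelB (dt : List (String × List String)) : Nat → String → Nat
  | 0, _ => 2
  | f + 1, n => 2 + ((pvDeps dt n).map (fun d => pvFuelB dt f d)).sum

-- the `while stack:` loop; head of the list = top of the stack
def pvRunB (dt : List (String × List String)) : Nat → List (String × Bool) → List String → List String
  | _, [], acc => acc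
  | 0, _ :: _, acc => acc   -- fuel exhaustion: unreachable under Pre_
  | f + 1, (n, true) :: rest, acc =>
      pvRunB dt f rest (acc ++ [n])
  | f + 1, (n, false) :: rest, acc =>
      if acc.contains n then pvRunB dt f rest acc
      else pvRunB dt f
        ((pvDeps dt n).reverse.foldl (fun s d => (d, false) :: s) ((n, true) :: rest)) acc

def get_removal_order_alt (dependency_tree : List (String × List String)) : List String :=
  (PySem.Dict.keys (PySem.Dict.mk dependency_tree)).foldl
    (fun acc g =>
      if acc.contains g then acc
      else pvRunB dependency_tree
        (pvFuelB dependency_tree (dependency_tree.length + 1) g) [(g, false)] acc) []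

-- ===== PRECONDITION & SPEC =====
-- Plain graph reachability on the input's edge relation (an edge n → d for each d in n's
-- dependency list): the set of nodes reachable from n in at most f steps. This is a property
-- of the input graph only — it maintains no removal order and no stack and is independent of
-- both ports' algorithms; it is used solely to state acyclicity below.
def pvReach (dt : List (String × List String)) : Nat → String → Finset String
  | 0, n => {n}
  | f + 1, n => insert n ((pvDeps dt n).foldr (fun d s => pvReach dt f d ∪ s) ∅)

-- Pre_ = the dependency graph is acyclic: no key reaches itself through one of its dependencies
-- (paths longer than the number of entries cannot be simple, so fuel `length` decides it).
-- These are exactly the inputs on which Python A returns: on a cyclic graph A's recursion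
-- never terminates (RecursionError), and B's stack loop never empties.
def Pre_get_removal_order (dependency_tree : List (String × List String)) : Prop :=
  ∀ n ∈ PySem.Dict.keys (PySem.Dict.mk dependency_tree),
    ∀ d ∈ pvDeps dependency_tree n, n ∉ pvReach dependency_tree dependency_tree.length d

instance (dependency_tree : List (String × List String)) : Decidable (Pre_get_removal_order dependency_tree) := by
  unfold Pre_get_removal_order; infer_instance

def pvWitness_get_removal_order : (List (String × List String)) :=
  [("app", ["db", "cache"]), ("db", []), ("cache", [])]

def Spec_get_removal_order (dependency_tree : List (String × List String)) (out : List String) : Prop := out = get_removal_order_alt dependency_tree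
instance (dependency_tree : List (String × List String)) (out : List String) : Decidable (Spec_get_removal_order dependency_tree out) := by unfold Spec_get_removal_order; infer_instance

-- ===== CLAIM (what is proved, stated in full; the proofs are below) =====
def Claim_equal_get_removal_order : Prop := ∀ (dependency_tree : List (String × List String)), Dom_get_removal_order dependency_tree → Pre_get_removal_order dependency_tree → Spec_get_removal_order dependency_tree (get_removal_order dependency_tree)

-- ===== LEMMAS AND PROOFS =====

theorem pvWitness_ok :
    Dom_get_removal_order pvWitness_get_removal_order ∧
    Pre_get_removal_order pvWitness_get_removal_order := by
  constructor <;> decide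

lemma pvReach_self (dt : List (String × List String)) (f : Nat) (n : String) :
    n ∈ pvReach dt f n := by
  cases f <;> simp [pvReach]

lemma pvMem_foldr_union (dt : List (String × List String)) (f : Nat) (ds : List String) (x : String) :
    x ∈ ds.foldr (fun d s => pvReach dt f d ∪ s) ∅ ↔ ∃ d ∈ ds, x ∈ pvReach dt f d := by
  induction ds with
  | nil => simp
  | cons d t ih => simp [ih]

lemma pvMem_reach_succ (dt : List (String × List String)) (f : Nat) (n x : String) :
    x ∈ pvReach dt (f + 1) n ↔ x = n ∨ ∃ d ∈ pvDeps dt n, x ∈ pvReach dt f d := by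
  simp [pvReach, pvMem_foldr_union]

lemma pvReach_mono (dt : List (String × List String)) :
    ∀ f g : Nat, f ≤ g → ∀ n, pvReach dt f n ⊆ pvReach dt g n := by
  intro f
  induction f with
  | zero =>
    intro g _ n x hx
    simp [pvReach] at hx
    subst hx
    exact pvReach_self dt g _
  | succ f ih =>
    intro g hg n x hx
    obtain ⟨g', rfl⟩ : ∃ g', g = g' + 1 := ⟨g - 1, by omega⟩
    rw [pvMem_reach_succ] at hx ⊢
    rcases hx with h | ⟨d, hd, hx⟩
    · exact Or.inl h
    · exact Or.inr ⟨d, hd, ih g' (by omega) d hx⟩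

lemma pvKey_of_deps (dt : List (String × List String)) (n : String)
    (h : pvDeps dt n ≠ []) : n ∈ PySem.Dict.keys (PySem.Dict.mk dt) := by
  by_contra hc
  have hfalse : (PySem.Dict.mk dt).contains n = false := by
    rw [Bool.eq_false_iff]
    exact fun ht => hc ((PySem.Dict.contains_iff_mem_keys _ n).1 ht)
  exact h (by simpa [pvDeps] using
    PySem.Dict.getD_of_not_contains (PySem.Dict.mk dt) ([] : List String) hfalse)

-- fuel-sufficiency measure: the number of keys reachable from n within f steps is < f
def pvH (dt : List (String × List String)) (f : Nat) (n : String) : Prop :=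
  (pvReach dt f n ∩ (PySem.Dict.keys (PySem.Dict.mk dt)).toFinset).card < f

lemma pvH_top (dt : List (String × List String)) (g : String) :
    pvH dt (dt.length + 1) g := by
  unfold pvH
  have h1 : (pvReach dt (dt.length + 1) g ∩ (PySem.Dict.keys (PySem.Dict.mk dt)).toFinset).card
      ≤ (PySem.Dict.keys (PySem.Dict.mk dt)).toFinset.card :=
    Finset.card_le_card Finset.inter_subset_right
  have h2 : (PySem.Dict.keys (PySem.Dict.mk dt)).toFinset.card
      ≤ (PySem.Dict.keys (PySem.Dict.mk dt)).length := List.toFinset_card_le _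
  have h3 : (PySem.Dict.keys (PySem.Dict.mk dt)).length = dt.length := by
    simp [PySem.Dict.keys]
  omega

lemma pvH_step (dt : List (String × List String)) (hPre : Pre_get_removal_order dt)
    (f : Nat) (hf : f ≤ dt.length) (n d : String) (hd : d ∈ pvDeps dt n)
    (hH : pvH dt (f + 1) n) : pvH dt f d := by
  unfold pvH at hH ⊢
  have hkey : n ∈ PySem.Dict.keys (PySem.Dict.mk dt) :=
    pvKey_of_deps dt n (by intro h; rw [h] at hd; exact (List.not_mem_nil).elim hd)
  have hsub : pvReach dt f d ∩ (PySem.Dict.keys (PySem.Dict.mk dt)).toFinset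
      ⊂ pvReach dt (f + 1) n ∩ (PySem.Dict.keys (PySem.Dict.mk dt)).toFinset := by
    constructor
    · refine Finset.inter_subset_inter ?_ (subset_refl _)
      intro x hx
      rw [pvMem_reach_succ]
      exact Or.inr ⟨d, hd, hx⟩
    · intro hcontra
      have hnin : n ∉ pvReach dt f d := by
        intro hmem
        exact hPre n hkey d hd (pvReach_mono dt f dt.length hf d hmem)
      have hnmem : n ∈ pvReach dt (f + 1) n ∩ (PySem.Dict.keys (PySem.Dict.mk dt)).toFinset :=
        Finset.mem_inter.2 ⟨pvReach_self dt (f + 1) n, List.mem_toFinset.2 hkey⟩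
      exact hnin (Finset.mem_inter.1 (hcontra hnmem)).1
  have := Finset.card_lt_card hsub
  omega

-- pushing the reversed dependency list onto the stack = prepending the enter frames in order
lemma pvPush (ds : List String) (init : List (String × Bool)) :
    ds.reverse.foldl (fun s d => (d, false) :: s) init
      = ds.map (fun d => (d, false)) ++ init := by
  induction ds with
  | nil => rfl
  | cons d t ih => simp [List.foldl_append, ih]

-- the simulation: processing one enter frame with enough fuel computes pvVisitA, leaves the
-- rest of the stack untouched, and has a determinate fuel cost c ≤ pvFuelB
lemma pvSim (dt : List (String × List String)) (hPre : Pre_get_removal_order dt) :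
    ∀ fA, fA ≤ dt.length + 1 → ∀ n, pvH dt fA n → ∀ acc,
      ∃ c, c ≤ pvFuelB dt fA n ∧ ∀ rest fB,
        pvRunB dt (c + fB) ((n, false) :: rest) acc = pvRunB dt fB rest (pvVisitA dt fA n acc) := by
  intro fA
  induction fA using Nat.strong_induction_on with
  | _ fA ih =>
    intro hfA n hH acc
    obtain ⟨f, rfl⟩ : ∃ f, fA = f + 1 := ⟨fA - 1, by unfold pvH at hH; omega⟩
    by_cases hc : acc.contains n = true
    · refine ⟨1, by simp only [pvFuelB]; omega, ?_⟩
      intro rest fB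
      have h1 : 1 + fB = fB + 1 := by omega
      rw [h1]
      simp only [pvRunB, pvVisitA, if_pos hc]
    · -- process the dependency enter frames one by one
      have hfold : ∀ (ds : List String), (∀ e ∈ ds, e ∈ pvDeps dt n) → ∀ acc₂,
          ∃ c, c ≤ (ds.map (fun d => pvFuelB dt f d)).sum ∧ ∀ rest fB,
            pvRunB dt (c + fB) (ds.map (fun d => (d, false)) ++ rest) acc₂
              = pvRunB dt fB rest (ds.foldl (fun a d => pvVisitA dt f d a) acc₂) := by
        intro ds
        induction ds with
        | nil => exact fun _ acc₂ => ⟨0, Nat.le_refl _, fun rest fB => by simp⟩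
        | cons d t iht =>
          intro hds acc₂
          have hHd : pvH dt f d :=
            pvH_step dt hPre f (by omega) n d (hds d List.mem_cons_self) hH
          obtain ⟨c1, hc1, he1⟩ := ih f (by omega) (by omega) d hHd acc₂
          obtain ⟨c2, hc2, he2⟩ :=
            iht (fun e he => hds e (List.mem_cons_of_mem d he)) (pvVisitA dt f d acc₂)
          refine ⟨c1 + c2, by simp only [List.map_cons, List.sum_cons]; omega, ?_⟩
          intro rest fB
          have h1 : c1 + c2 + fB = c1 + (c2 + fB) := by omega
          simp only [List.map_cons, List.cons_append, h1]
          rw [he1 (t.map (fun d => (d, false)) ++ rest) (c2 + fB), he2 rest fB]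
          simp only [List.foldl_cons]
      obtain ⟨cS, hcS, heS⟩ := hfold (pvDeps dt n) (fun _ h => h) acc
      set accF := (pvDeps dt n).foldl (fun a d => pvVisitA dt f d a) acc with haccF
      refine ⟨cS + 2, ?_, ?_⟩
      · simp only [pvFuelB]; omega
      · intro rest fB
        have h1 : cS + 2 + fB = (cS + (1 + fB)) + 1 := by omega
        rw [h1]
        simp only [pvRunB, if_neg hc, pvPush]
        rw [heS ((n, true) :: rest) (1 + fB)]
        have h2 : 1 + fB = fB + 1 := by omega
        rw [h2]
        simp only [pvRunB]
        have h3 : pvVisitA dt (f + 1) n acc = accF ++ [n] := by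
          simp only [pvVisitA, if_neg hc, ← haccF]
        rw [h3]

-- ===== VERDICT (by name: the statement is the Claim_ definition above) =====
theorem get_removal_order_spec : Claim_equal_get_removal_order := by
  intro dt _hDom hPre
  unfold Spec_get_removal_order get_removal_order get_removal_order_alt
  have hstep : ∀ (ks : List String) (acc : List String),
      ks.foldl (fun acc g => pvVisitA dt (dt.length + 1) g acc) acc
        = ks.foldl (fun acc g =>
            if acc.contains g then acc
            else pvRunB dt (pvFuelB dt (dt.length + 1) g) [(g, false)] acc) acc := by
    intro ks
    induction ks with
    | nil => intro acc; rfl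
    | cons g t ih =>
      intro acc
      simp only [List.foldl_cons]
      rw [ih]
      congr 1
      by_cases hc : acc.contains g = true
      · have : dt.length + 1 = dt.length + 1 := rfl
        simp only [pvVisitA, if_pos hc]
      · obtain ⟨c, hcle, he⟩ := pvSim dt hPre (dt.length + 1) (Nat.le_refl _) g (pvH_top dt g) acc
        have hfuel : pvFuelB dt (dt.length + 1) g = c + (pvFuelB dt (dt.length + 1) g - c) := by
          omega
        rw [if_neg hc, hfuel, he [] (pvFuelB dt (dt.length + 1) g - c)]
        simp only [pvRunB]
  exact hstep _ []
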